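-- pv_equiv track=rewrite | github.com/AshaTulsyan/CSE-230 | 20171117-230-assignment5/solution/crack.py | transform_digits_helper
-- ===== SOURCE A (Python) =====
-- def transform_digits_helper(str,dic):
--     if not str:
--       yield ""
--     else:
--       temp = str[0]
--       if temp.upper() == temp.lower() or (temp.lower() not in dic):
--         for subEach in transform_digits_helper(str[1:],dic):
--           yield temp + subEach
--       else:
--         for subEach in transform_digits_helper(str[1:],dic):
--           yield temp + subEach
--           for digit in dic[temp.lower()]:
--             yield digit + subEach
-- ===== SOURCE B (Python) =====
-- def transform_digits_helper(str, dic):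
--     # Iterative re-implementation: precompute per-character option lists, then
--     # fold right-to-left, which reproduces A's exact order (first char varies fastest).
--     options = []
--     for c in str:
--         if c.upper() == c.lower() or c.lower() not in dic:
--             options.append([c])
--         else:
--             options.append([c] + list(dic[c.lower()]))
--     combos = [""]
--     for opts in reversed(options):
--         combos = [opt + s for s in combos for opt in opts]
--     return combos
-- ===== Notes on version B (the rewrite author's own statement) =====
-- stated objective: faster
-- what changed: Replaces A's recursive generator (one generator frame per character, option choices re-derived inside nested yields) by an iterative two-phase version: precompute each character's option list once, then build all combinations with a single right-to-left fold of list comprehensions reproducing A's exact order; avoiding the per-item chain of nested generator resumptions gives a constant-factor speedup.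
import Mathlib
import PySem

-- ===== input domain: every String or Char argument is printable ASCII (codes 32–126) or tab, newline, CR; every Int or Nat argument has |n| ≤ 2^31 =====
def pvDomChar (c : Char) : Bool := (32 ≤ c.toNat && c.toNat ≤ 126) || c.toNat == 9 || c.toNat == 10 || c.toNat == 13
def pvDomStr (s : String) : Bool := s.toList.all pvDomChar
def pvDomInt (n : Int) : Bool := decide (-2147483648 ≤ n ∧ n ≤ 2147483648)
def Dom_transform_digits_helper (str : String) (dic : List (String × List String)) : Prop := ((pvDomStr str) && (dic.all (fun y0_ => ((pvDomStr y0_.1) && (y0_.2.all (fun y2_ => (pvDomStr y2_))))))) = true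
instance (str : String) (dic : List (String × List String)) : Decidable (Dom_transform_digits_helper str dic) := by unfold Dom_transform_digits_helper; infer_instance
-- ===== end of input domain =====

-- B replaces A's recursive generator by precomputed per-character option lists folded
-- right-to-left; equivalence of the yielded sequence (as a list) is proved on all inputs.
-- ===== PORT A =====
-- A is a generator; the port returns the list of its yields. Python strings are carried as
-- List Char and re-packed with String.mk at the boundary; the dict parameter is materialised
-- with PySem.Dict.ofList (duplicate keys overwrite, as in a Python dict).
def tdhGoA (D : PySem.Dict String (List String)) : List Char → List (List Char)
  | [] => [[]]
  | c :: rest =>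
    if PySem.Chars.upper [c] == PySem.Chars.lower [c]
        || !(D.contains (String.mk (PySem.Chars.lower [c]))) then
      (tdhGoA D rest).map (fun subEach => [c] ++ subEach)
    else
      (tdhGoA D rest).flatMap (fun subEach =>
        ([c] ++ subEach) ::
          (D.getD (String.mk (PySem.Chars.lower [c])) []).map (fun digit => digit.toList ++ subEach))

def transform_digits_helper (str : String) (dic : List (String × List String)) : List String :=
  (tdhGoA (PySem.Dict.ofList dic) str.toList).map String.mk

-- ===== PORT B =====
-- the option list B computes for one character c
def pvOpts (D : PySem.Dict String (List String)) (c : Char) : List (List Char) :=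
  if PySem.Chars.upper [c] == PySem.Chars.lower [c]
      || !(D.contains (String.mk (PySem.Chars.lower [c]))) then
    [[c]]
  else
    [c] :: (D.getD (String.mk (PySem.Chars.lower [c])) []).map (fun d => d.toList)

def transform_digits_helper_alt (str : String) (dic : List (String × List String)) : List String :=
  let D := PySem.Dict.ofList dic
  let options := str.toList.map (pvOpts D)
  (options.reverse.foldl
      (fun combos opts => combos.flatMap (fun s => opts.map (fun opt => opt ++ s)))
      ([[]] : List (List Char))).map String.mk

-- ===== PRECONDITION & SPEC =====
def Spec_transform_digits_helper (str : String) (dic : List (String × List String)) (out : List String) : Prop := out = transform_digits_helper_alt str dic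
instance (str : String) (dic : List (String × List String)) (out : List String) : Decidable (Spec_transform_digits_helper str dic out) := by unfold Spec_transform_digits_helper; infer_instance

-- ===== CLAIM (what is proved, stated in full; the proofs are below) =====
def Claim_equal_transform_digits_helper : Prop := ∀ (str : String) (dic : List (String × List String)), Dom_transform_digits_helper str dic → Spec_transform_digits_helper str dic (transform_digits_helper str dic)


-- ===== LEMMAS AND PROOFS =====
theorem tdhGoA_eq_foldl (D : PySem.Dict String (List String)) (cs : List Char) :
    tdhGoA D cs =
      (cs.map (pvOpts D)).reverse.foldl
        (fun combos opts => combos.flatMap (fun s => opts.map (fun opt => opt ++ s)))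
        ([[]] : List (List Char)) := by
  induction cs with
  | nil => rfl
  | cons c rest ih =>
    simp only [List.map_cons, List.reverse_cons, List.foldl_append, List.foldl_cons,
      List.foldl_nil, ← ih]
    by_cases h : (PySem.Chars.upper [c] == PySem.Chars.lower [c]
        || !(D.contains (String.mk (PySem.Chars.lower [c])))) = true
    · simp only [tdhGoA, pvOpts, if_pos h]
      exact List.map_eq_flatMap
    · simp only [tdhGoA, pvOpts, if_neg h]
      simp [Function.comp_def]

-- ===== VERDICT (by name: the statement is the Claim_ definition above) =====
theorem transform_digits_helper_spec : Claim_equal_transform_digits_helper := by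
  intro str dic _
  unfold Spec_transform_digits_helper transform_digits_helper transform_digits_helper_alt
  rw [tdhGoA_eq_foldl]
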